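-- pv_equiv track=rewrite | github.com/gabrielsaban/comp3011-web-api | scripts/import.py | _iter_chunks
-- ===== SOURCE A (Python) =====
-- from collections.abc import Iterator
-- from typing import Any
--
-- CHUNK_SIZE = 5000
--
-- def _iter_chunks(
--     rows: Iterator[dict[str, Any]], size: int = CHUNK_SIZE
-- ) -> Iterator[list[dict[str, Any]]]:
--     chunk: list[dict[str, Any]] = []
--     for row in rows:
--         chunk.append(row)
--         if len(chunk) >= size:
--             yield chunk
--             chunk = []
--     if chunk:
--         yield chunk
-- ===== SOURCE B (Python) =====
-- from itertools import islice
--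
-- def _iter_chunks(rows, size=5000):
--     it = iter(rows)
--     k = max(1, size)
--     while True:
--         chunk = list(islice(it, k))
--         if not chunk:
--             return
--         yield chunk
-- ===== Notes on version B (the rewrite author's own statement) =====
-- stated objective: idiomatic
-- what changed: Replaces the per-element append-and-length-check accumulator with a pull-based generator that slices the iterator blockwise via itertools.islice(it, max(1, size)).
import Mathlib
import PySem

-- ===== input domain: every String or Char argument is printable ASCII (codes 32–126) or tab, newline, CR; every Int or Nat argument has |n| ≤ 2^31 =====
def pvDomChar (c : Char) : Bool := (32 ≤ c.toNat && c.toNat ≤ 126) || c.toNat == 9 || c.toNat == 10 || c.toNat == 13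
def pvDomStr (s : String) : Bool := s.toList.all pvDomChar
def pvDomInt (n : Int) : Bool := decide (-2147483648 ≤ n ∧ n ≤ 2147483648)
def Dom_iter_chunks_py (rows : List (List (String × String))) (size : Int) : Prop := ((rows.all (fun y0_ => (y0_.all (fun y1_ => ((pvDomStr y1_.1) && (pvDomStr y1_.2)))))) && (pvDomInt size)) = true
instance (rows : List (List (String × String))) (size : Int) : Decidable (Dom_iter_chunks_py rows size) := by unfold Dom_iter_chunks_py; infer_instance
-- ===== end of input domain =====

-- B replaces A's per-element append/length-check accumulator by pull-based block slicing
-- (list(islice(it, max(1, size)))); same return value, idiomatic decomposition. A is a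
-- generator; equivalence is about the list of yielded chunks.

-- ===== PORT A =====
-- the for-loop of A: state is the current `chunk` accumulator
def iterChunksLoopA (size : Int) : List (List (String × String)) → List (List (String × String)) → List (List (List (String × String)))
  | [], chunk => if chunk = [] then [] else [chunk]   -- `if chunk: yield chunk`
  | r :: rs, chunk =>
      let c := chunk ++ [r]
      if size ≤ (c.length : Int) then c :: iterChunksLoopA size rs []
      else iterChunksLoopA size rs c

def iter_chunks_py (rows : List (List (String × String))) (size : Int) : List (List (List (String × String))) :=
  iterChunksLoopA size rows []

-- ===== PORT B =====
-- `while True: chunk = list(islice(it, k)); if not chunk: return; yield chunk`,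
-- with k = max(1, size) ≥ 1 carried as m + 1 (m = k - 1) so the recursion is well founded.
def iterChunksSliceB (m : Nat) : List (List (String × String)) → List (List (List (String × String)))
  | [] => []
  | x :: xs => ((x :: xs).take (m + 1)) :: iterChunksSliceB m ((x :: xs).drop (m + 1))
termination_by xs => xs.length
decreasing_by simp

def iter_chunks_py_alt (rows : List (List (String × String))) (size : Int) : List (List (List (String × String))) :=
  iterChunksSliceB ((max 1 size).toNat - 1) rows

-- ===== PRECONDITION & SPEC =====
def Spec_iter_chunks_py (rows : List (List (String × String))) (size : Int) (out : List (List (List (String × String)))) : Prop := out = iter_chunks_py_alt rows size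
instance (rows : List (List (String × String))) (size : Int) (out : List (List (List (String × String)))) : Decidable (Spec_iter_chunks_py rows size out) := by unfold Spec_iter_chunks_py; infer_instance

-- ===== CLAIM (what is proved, stated in full; the proofs are below) =====
def Claim_equal_iter_chunks_py : Prop := ∀ (rows : List (List (String × String))) (size : Int), Dom_iter_chunks_py rows size → Spec_iter_chunks_py rows size (iter_chunks_py rows size)

-- ===== LEMMAS AND PROOFS =====

theorem sliceB_nil (m : Nat) : iterChunksSliceB m [] = [] := by
  rw [iterChunksSliceB]

theorem sliceB_cons (m : Nat) (x : List (String × String)) (xs : List (List (String × String))) :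
    iterChunksSliceB m (x :: xs)
      = ((x :: xs).take (m + 1)) :: iterChunksSliceB m ((x :: xs).drop (m + 1)) := by
  rw [iterChunksSliceB]

-- A's accumulator loop, started with a partial chunk shorter than the chunk size,
-- chunks `chunk ++ rs` blockwise.
theorem iterChunksLoopA_eq_slice (size : Int) (m : Nat)
    (hsz : ∀ l : Nat, 1 ≤ l → (size ≤ (l : Int) ↔ m + 1 ≤ l)) :
    ∀ (rs chunk : List (List (String × String))), chunk.length ≤ m →
      iterChunksLoopA size rs chunk = iterChunksSliceB m (chunk ++ rs) := by
  intro rs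
  induction rs with
  | nil =>
      intro chunk hc
      cases chunk with
      | nil => simp [iterChunksLoopA, sliceB_nil]
      | cons x xs =>
          simp only [iterChunksLoopA, List.append_nil, sliceB_cons]
          rw [List.take_of_length_le (by simp at hc ⊢; omega),
              List.drop_of_length_le (by simp at hc ⊢; omega), sliceB_nil]
          simp
  | cons r rs ih =>
      intro chunk hc
      simp only [iterChunksLoopA]
      by_cases h : size ≤ ((chunk ++ [r]).length : Int)
      · have hlen : (chunk ++ [r]).length = m + 1 := by
          have := (hsz (chunk ++ [r]).length (by simp)).mp h
          simp at this ⊢; omega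
        have hsplit : chunk ++ r :: rs = (chunk ++ [r]) ++ rs := by simp
        have htake : (chunk ++ r :: rs).take (m + 1) = chunk ++ [r] := by
          rw [hsplit, List.take_append, hlen, List.take_of_length_le (le_of_eq hlen)]; simp
        have hdrop : (chunk ++ r :: rs).drop (m + 1) = rs := by
          rw [hsplit, List.drop_append, hlen, List.drop_of_length_le (le_of_eq hlen)]; simp
        rw [if_pos h, ih [] (by simp)]
        simp only [List.nil_append]
        cases hrs : chunk ++ r :: rs with
        | nil => simp at hrs
        | cons y ys =>
            rw [sliceB_cons, ← hrs, htake, hdrop]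
      · have hlt : chunk.length < m := by
          have h2 : ¬ (m + 1 ≤ (chunk ++ [r]).length) :=
            fun hm => h ((hsz (chunk ++ [r]).length (by simp)).mpr hm)
          simp at h2 ⊢; omega
        rw [if_neg h, ih (chunk ++ [r]) (by simp; omega)]
        simp

-- ===== VERDICT (by name: the statement is the Claim_ definition above) =====
theorem iter_chunks_py_spec : Claim_equal_iter_chunks_py := by
  intro rows size _
  unfold Spec_iter_chunks_py iter_chunks_py iter_chunks_py_alt
  have h := iterChunksLoopA_eq_slice size ((max 1 size).toNat - 1)
    (by intro l hl; omega) rows [] (by simp)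
  simpa using h
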